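-- pv_equiv track=rewrite | github.com/google-research/google-research | dedal/preprocessing/alignment.py | alignment_from_gapped_sequences
-- ===== SOURCE A (Python) =====
-- def alignment_from_gapped_sequences(
--     gapped_sequence_x,
--     gapped_sequence_y,
-- ):
--   """Extracts positions of match states in gapped sequences `x` and `y`."""
--   matches = []
--   ptr_x, ptr_y = 1, 1  # One-based indexing.
--   for c_x, c_y in zip(gapped_sequence_x, gapped_sequence_y):
--     if c_x.isupper() and c_y.isupper():
--       matches.append((ptr_x, ptr_y))
--     ptr_x += c_x.isalpha()
--     ptr_y += c_y.isalpha()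
--
--   # Retrieves (one-based) starting position of the alignment.
--   ali_start_x = matches[0][0] if matches else 0
--   ali_start_y = matches[0][1] if matches else 0
--   # Normalizes the indices of matching positions relative to the start of the
--   # alignment.
--   matches = [(x - ali_start_x, y - ali_start_y) for x, y in matches]
--
--   return matches, (ali_start_x, ali_start_y)
-- ===== SOURCE B (Python) =====
-- def alignment_from_gapped_sequences(
--     gapped_sequence_x,
--     gapped_sequence_y,
-- ):
--   """Extracts positions of match states in gapped sequences `x` and `y`."""
--   pairs = list(zip(gapped_sequence_x, gapped_sequence_y))
--
--   # Locate the first match column; without one the alignment is empty.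
--   first = None
--   for i, (c_x, c_y) in enumerate(pairs):
--     if c_x.isupper() and c_y.isupper():
--       first = i
--       break
--   if first is None:
--     return [], (0, 0)
--
--   # One-based start = 1 + number of alphabetic characters before the first match.
--   start_x = 1 + sum(c_x.isalpha() for c_x, _ in pairs[:first])
--   start_y = 1 + sum(c_y.isalpha() for _, c_y in pairs[:first])
--
--   # Emit matches already normalized: offsets relative to the first match column.
--   matches = []
--   off_x, off_y = 0, 0
--   for c_x, c_y in pairs[first:]:
--     if c_x.isupper() and c_y.isupper():
--       matches.append((off_x, off_y))
--     off_x += c_x.isalpha()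
--     off_y += c_y.isalpha()
--   return matches, (start_x, start_y)
-- ===== Notes on version B (the rewrite author's own statement) =====
-- stated objective: alternative
-- what changed: B first searches for the first match column, derives the one-based start by counting alphabetic characters in the prefix before it, and then emits already-normalized relative offsets while scanning only from that column on, whereas A threads two absolute one-based pointers through the whole string and normalizes the collected matches in a second subtraction pass.
import Mathlib
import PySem

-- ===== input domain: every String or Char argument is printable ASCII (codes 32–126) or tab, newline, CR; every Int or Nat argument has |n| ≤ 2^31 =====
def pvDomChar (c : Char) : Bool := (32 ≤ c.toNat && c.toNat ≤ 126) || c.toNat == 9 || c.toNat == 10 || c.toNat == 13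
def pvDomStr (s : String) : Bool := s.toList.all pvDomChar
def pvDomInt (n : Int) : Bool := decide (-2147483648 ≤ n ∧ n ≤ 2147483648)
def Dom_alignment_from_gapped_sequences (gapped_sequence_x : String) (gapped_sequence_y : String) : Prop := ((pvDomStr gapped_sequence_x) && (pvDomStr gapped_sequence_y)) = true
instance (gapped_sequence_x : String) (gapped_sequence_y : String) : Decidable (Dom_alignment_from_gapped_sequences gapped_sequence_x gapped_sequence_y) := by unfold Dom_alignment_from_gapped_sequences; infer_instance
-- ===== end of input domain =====

-- B finds the first match column, derives the start from a prefix alphabetic count and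
-- emits already-normalized offsets scanning from that column only, instead of A's absolute
-- pointer loop plus a second normalization pass (alternative decomposition, same cost).


-- ===== PORT A =====
-- A: one loop over zipped characters threading (matchList, ptr_x, ptr_y); then a
-- normalization pass subtracting the first match.
def alignment_from_gapped_sequences (gapped_sequence_x : String) (gapped_sequence_y : String) : (List (Int × Int)) × (Int × Int) :=
  let st :=
    ((gapped_sequence_x.toList).zip (gapped_sequence_y.toList)).foldl
      (fun (st : List (Int × Int) × Int × Int) c =>
        let ms := if PySem.Chars.isupper c.1 && PySem.Chars.isupper c.2
                  then st.1 ++ [(st.2.1, st.2.2)] else st.1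
        (ms, st.2.1 + (if PySem.Chars.isalpha c.1 then 1 else 0),
             st.2.2 + (if PySem.Chars.isalpha c.2 then 1 else 0)))
      ([], 1, 1)
  let matchList := st.1
  let ali_start_x : Int := match matchList with | [] => 0 | m :: _ => m.1
  let ali_start_y : Int := match matchList with | [] => 0 | m :: _ => m.2
  (matchList.map (fun m => (m.1 - ali_start_x, m.2 - ali_start_y)), (ali_start_x, ali_start_y))

-- ===== PORT B =====
-- B helper: the enumerate/break search for the first match column (index of the first
-- pair whose two characters are both uppercase).
def pvFindFirst (ps : List (Char × Char)) : Option Nat :=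
  match ps with
  | [] => none
  | p :: ps =>
      if PySem.Chars.isupper p.1 && PySem.Chars.isupper p.2 then some 0
      else (pvFindFirst ps).map (· + 1)

def alignment_from_gapped_sequences_alt (gapped_sequence_x : String) (gapped_sequence_y : String) : (List (Int × Int)) × (Int × Int) :=
  let pairs := (gapped_sequence_x.toList).zip (gapped_sequence_y.toList)
  match pvFindFirst pairs with
  | none => ([], (0, 0))
  | some first =>
    -- pairs[:first] / pairs[first:] are exact as take/drop since 0 ≤ first ≤ len.
    let start_x : Int := 1 + (pairs.take first).foldl
        (fun a p => a + (if PySem.Chars.isalpha p.1 then 1 else 0)) 0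
    let start_y : Int := 1 + (pairs.take first).foldl
        (fun a p => a + (if PySem.Chars.isalpha p.2 then 1 else 0)) 0
    let st := (pairs.drop first).foldl
        (fun (st : List (Int × Int) × Int × Int) c =>
          let ms := if PySem.Chars.isupper c.1 && PySem.Chars.isupper c.2
                    then st.1 ++ [(st.2.1, st.2.2)] else st.1
          (ms, st.2.1 + (if PySem.Chars.isalpha c.1 then 1 else 0),
               st.2.2 + (if PySem.Chars.isalpha c.2 then 1 else 0)))
        ([], 0, 0)
    (st.1, (start_x, start_y))

-- ===== PRECONDITION & SPEC =====
def Spec_alignment_from_gapped_sequences (gapped_sequence_x : String) (gapped_sequence_y : String) (out : (List (Int × Int)) × (Int × Int)) : Prop := out = alignment_from_gapped_sequences_alt gapped_sequence_x gapped_sequence_y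
instance (gapped_sequence_x : String) (gapped_sequence_y : String) (out : (List (Int × Int)) × (Int × Int)) : Decidable (Spec_alignment_from_gapped_sequences gapped_sequence_x gapped_sequence_y out) := by unfold Spec_alignment_from_gapped_sequences; infer_instance

-- ===== CLAIM (what is proved, stated in full; the proofs are below) =====
def Claim_equal_alignment_from_gapped_sequences : Prop := ∀ (gapped_sequence_x : String) (gapped_sequence_y : String), Dom_alignment_from_gapped_sequences gapped_sequence_x gapped_sequence_y → Spec_alignment_from_gapped_sequences gapped_sequence_x gapped_sequence_y (alignment_from_gapped_sequences gapped_sequence_x gapped_sequence_y)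

-- ===== LEMMAS AND PROOFS =====

-- Reference form of the absolute-position match list.
def pvCore (ps : List (Char × Char)) (px py : Int) : List (Int × Int) :=
  match ps with
  | [] => []
  | p :: ps =>
      (if PySem.Chars.isupper p.1 && PySem.Chars.isupper p.2 then [(px, py)] else []) ++
        pvCore ps (px + (if PySem.Chars.isalpha p.1 then 1 else 0))
                  (py + (if PySem.Chars.isalpha p.2 then 1 else 0))

-- The shared fold shape (A's whole loop; B's tail loop) computes pvCore.
theorem pv_loop (ps : List (Char × Char)) (ms : List (Int × Int)) (px py : Int) :
    (ps.foldl
      (fun (st : List (Int × Int) × Int × Int) c =>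
        let m := if PySem.Chars.isupper c.1 && PySem.Chars.isupper c.2
                 then st.1 ++ [(st.2.1, st.2.2)] else st.1
        (m, st.2.1 + (if PySem.Chars.isalpha c.1 then 1 else 0),
            st.2.2 + (if PySem.Chars.isalpha c.2 then 1 else 0)))
      (ms, px, py)).1 = ms ++ pvCore ps px py := by
  induction ps generalizing ms px py with
  | nil => simp [pvCore]
  | cons p ps ih =>
    simp only [List.foldl_cons, pvCore]
    rw [ih]
    by_cases h : (PySem.Chars.isupper p.1 && PySem.Chars.isupper p.2) = true <;> simp [h]

-- B's prefix sums, recursively.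
def pvSumX (ps : List (Char × Char)) : Int :=
  match ps with
  | [] => 0
  | p :: ps => (if PySem.Chars.isalpha p.1 then 1 else 0) + pvSumX ps

def pvSumY (ps : List (Char × Char)) : Int :=
  match ps with
  | [] => 0
  | p :: ps => (if PySem.Chars.isalpha p.2 then 1 else 0) + pvSumY ps

theorem pv_sumX_fold (ps : List (Char × Char)) (a : Int) :
    ps.foldl (fun a p => a + (if PySem.Chars.isalpha p.1 then 1 else 0)) a = a + pvSumX ps := by
  induction ps generalizing a with
  | nil => simp [pvSumX]
  | cons p ps ih => simp [pvSumX, ih]; ring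

theorem pv_sumY_fold (ps : List (Char × Char)) (a : Int) :
    ps.foldl (fun a p => a + (if PySem.Chars.isalpha p.2 then 1 else 0)) a = a + pvSumY ps := by
  induction ps generalizing a with
  | nil => simp [pvSumY]
  | cons p ps ih => simp [pvSumY, ih]; ring

-- Shifting the start positions shifts every emitted pair.
theorem pvCore_shift (ps : List (Char × Char)) (px py dx dy : Int) :
    pvCore ps (px + dx) (py + dy) = (pvCore ps px py).map (fun m => (m.1 + dx, m.2 + dy)) := by
  induction ps generalizing px py with
  | nil => simp [pvCore]
  | cons p ps ih =>
    simp only [pvCore, List.map_append]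
    rw [show px + dx + (if PySem.Chars.isalpha p.1 then 1 else 0)
          = (px + (if PySem.Chars.isalpha p.1 then 1 else 0)) + dx by ring,
        show py + dy + (if PySem.Chars.isalpha p.2 then 1 else 0)
          = (py + (if PySem.Chars.isalpha p.2 then 1 else 0)) + dy by ring, ih]
    by_cases h : (PySem.Chars.isupper p.1 && PySem.Chars.isupper p.2) = true <;> simp [h]

-- No match column ⇒ pvCore is empty.
theorem pvCore_of_find_none (ps : List (Char × Char)) (h : pvFindFirst ps = none)
    (px py : Int) : pvCore ps px py = [] := by
  induction ps generalizing px py with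
  | nil => simp [pvCore]
  | cons p ps ih =>
    simp only [pvFindFirst] at h
    by_cases hp : (PySem.Chars.isupper p.1 && PySem.Chars.isupper p.2) = true
    · simp [hp] at h
    · simp [hp, Option.map_eq_none_iff] at h
      simp [pvCore, hp, ih h]

-- First match at index i ⇒ pvCore skips the prefix accumulating its alpha counts.
theorem pvCore_of_find_some (ps : List (Char × Char)) (i : Nat)
    (h : pvFindFirst ps = some i) (px py : Int) :
    pvCore ps px py
      = pvCore (ps.drop i) (px + pvSumX (ps.take i)) (py + pvSumY (ps.take i)) := by
  induction ps generalizing i px py with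
  | nil => simp [pvFindFirst] at h
  | cons p ps ih =>
    simp only [pvFindFirst] at h
    by_cases hp : (PySem.Chars.isupper p.1 && PySem.Chars.isupper p.2) = true
    · simp [hp] at h
      subst h
      simp [pvSumX, pvSumY]
    · simp [hp, Option.map_eq_some_iff] at h
      obtain ⟨j, hj, rfl⟩ := h
      simp only [pvCore, hp, if_neg, List.drop_succ_cons, List.take_succ_cons,
        pvSumX, pvSumY, List.nil_append, Bool.not_eq_true] at *
      rw [ih j hj]
      congr 1 <;> ring

-- The dropped tail starts with the match column itself.
theorem pv_drop_find (ps : List (Char × Char)) (i : Nat) (h : pvFindFirst ps = some i) :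
    ∃ p t, ps.drop i = p :: t ∧ (PySem.Chars.isupper p.1 && PySem.Chars.isupper p.2) = true := by
  induction ps generalizing i with
  | nil => simp [pvFindFirst] at h
  | cons p ps ih =>
    simp only [pvFindFirst] at h
    by_cases hp : (PySem.Chars.isupper p.1 && PySem.Chars.isupper p.2) = true
    · simp [hp] at h; subst h; exact ⟨p, ps, rfl, hp⟩
    · simp [hp, Option.map_eq_some_iff] at h
      obtain ⟨j, hj, rfl⟩ := h
      simpa using ih j hj

-- ===== VERDICT (by name: the statement is the Claim_ definition above) =====
theorem alignment_from_gapped_sequences_spec : Claim_equal_alignment_from_gapped_sequences := by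
  intro x y _
  unfold Spec_alignment_from_gapped_sequences
  unfold alignment_from_gapped_sequences alignment_from_gapped_sequences_alt
  set ps := (x.toList).zip (y.toList) with hps
  simp only [pv_loop, pv_sumX_fold, pv_sumY_fold, List.nil_append, zero_add]
  cases hf : pvFindFirst ps with
  | none =>
    simp [pvCore_of_find_none ps hf]
  | some i =>
    obtain ⟨p, t, hd, hp⟩ := pv_drop_find ps i hf
    rw [pvCore_of_find_some ps i hf 1 1, hd]
    have h00 : pvCore (p :: t) (0 + (1 + pvSumX (ps.take i))) (0 + (1 + pvSumY (ps.take i)))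
        = (pvCore (p :: t) 0 0).map
            (fun m => (m.1 + (1 + pvSumX (ps.take i)), m.2 + (1 + pvSumY (ps.take i)))) :=
      pvCore_shift _ _ _ _ _
    simp only [zero_add] at h00
    rw [show (1 : Int) + pvSumX (ps.take i) = 1 + pvSumX (ps.take i) from rfl] at h00
    have hhead : pvCore (p :: t) (1 + pvSumX (ps.take i)) (1 + pvSumY (ps.take i))
        = (1 + pvSumX (ps.take i), 1 + pvSumY (ps.take i)) ::
            pvCore t (1 + pvSumX (ps.take i) + (if PySem.Chars.isalpha p.1 then 1 else 0))
                     (1 + pvSumY (ps.take i) + (if PySem.Chars.isalpha p.2 then 1 else 0)) := by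
      simp [pvCore, hp]
    rw [h00]
    cases hc : pvCore (p :: t) 0 0 with
    | nil => simp [pvCore, hp] at hc
    | cons m ms =>
      have hm : m = (0, 0) := by
        simp [pvCore, hp] at hc
        exact hc.1.symm
      subst hm
      simp only [List.map_cons, hd, hc]
      simp [Function.comp_def]
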